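-- pv_equiv track=rewrite | github.com/laynefa/AdventCode2021 | Day3/Puzzle.py | get_filter_critera
-- ===== SOURCE A (Python) =====
-- def get_filter_critera(binary_data, bit_position, operation):
--     counts0 = 0
--     counts1 = 0
--     zero_locations = set()
--     ones_locations = set()
--     for count, data in enumerate(binary_data):
--         if data[bit_position] == '0':
--             counts0 += 1
--             zero_locations.add(count)
--         else:
--             counts1 += 1
--             ones_locations.add(count)
--     if operation == 'oxygen':
--         if counts1 >= counts0:
--             return ones_locations
--         else:
--             return zero_locations
--     else:
--         if counts0 <= counts1:
--             return zero_locations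
--         else:
--             return ones_locations
-- ===== SOURCE B (Python) =====
-- def get_filter_critera(binary_data, bit_position, operation):
--     zeros = sum(1 for d in binary_data if d[bit_position] == '0')
--     keep_zeros = (len(binary_data) - zeros >= zeros) != (operation == 'oxygen')
--     return {i for i, d in enumerate(binary_data) if (d[bit_position] == '0') == keep_zeros}
-- ===== Notes on version B (the rewrite author's own statement) =====
-- stated objective: simpler
-- what changed: Replaces the single loop maintaining two counters and two index sets with a counting pass that derives one boolean keep_zeros from the shared majority condition, followed by one comprehension building only the set that is returned.
import Mathlib
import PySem

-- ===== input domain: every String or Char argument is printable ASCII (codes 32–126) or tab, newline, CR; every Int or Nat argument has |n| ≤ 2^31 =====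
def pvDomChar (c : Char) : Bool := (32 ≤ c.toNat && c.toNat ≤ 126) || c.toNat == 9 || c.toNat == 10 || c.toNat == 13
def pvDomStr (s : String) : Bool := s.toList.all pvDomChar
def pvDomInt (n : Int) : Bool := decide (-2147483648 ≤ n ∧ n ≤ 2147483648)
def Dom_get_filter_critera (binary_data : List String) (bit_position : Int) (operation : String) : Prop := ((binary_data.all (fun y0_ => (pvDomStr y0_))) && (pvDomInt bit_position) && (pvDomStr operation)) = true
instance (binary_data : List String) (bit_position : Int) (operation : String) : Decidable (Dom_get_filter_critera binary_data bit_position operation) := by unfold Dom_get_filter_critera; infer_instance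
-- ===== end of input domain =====

-- B builds only the one set that is returned (one count, one boolean, one selection pass)
-- instead of A's single loop maintaining two counters and both index sets; same cost, simpler.

-- shared helper: the test `data[bit_position] == '0'` as both Pythons write it
def pvIsZero (bit_position : Int) (d : String) : Bool :=
  PySem.Str.pyGet? d bit_position == some '0'

-- ===== PORT A =====
def pvStepA (bit_position : Int) (s : Int × Int × PySem.Set Int × PySem.Set Int)
    (p : Int × String) : Int × Int × PySem.Set Int × PySem.Set Int :=
  if pvIsZero bit_position p.2 then
    (s.1 + 1, s.2.1, PySem.Set.add s.2.2.1 p.1, s.2.2.2)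
  else
    (s.1, s.2.1 + 1, s.2.2.1, PySem.Set.add s.2.2.2 p.1)

def get_filter_critera (binary_data : List String) (bit_position : Int) (operation : String) : List Int :=
  let st := (PySem.List.enumerate binary_data).foldl (pvStepA bit_position)
    (0, 0, PySem.Set.empty, PySem.Set.empty)
  if operation == "oxygen" then
    if st.2.1 ≥ st.1 then st.2.2.2 else st.2.2.1
  else
    if st.1 ≤ st.2.1 then st.2.2.1 else st.2.2.2

-- ===== PORT B =====
def get_filter_critera_alt (binary_data : List String) (bit_position : Int) (operation : String) : List Int :=
  let zeros : Int := (binary_data.countP (pvIsZero bit_position) : Int)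
  let keep_zeros : Bool :=
    (decide (PySem.List.len binary_data - zeros ≥ zeros)) != (operation == "oxygen")
  PySem.Set.ofList (((PySem.List.enumerate binary_data).filter
    (fun q => pvIsZero bit_position q.2 == keep_zeros)).map (·.1))

-- ===== PRECONDITION & SPEC =====
-- Pre_ excludes exactly the inputs where Python A raises IndexError: some string too short for bit_position.
def Pre_get_filter_critera (binary_data : List String) (bit_position : Int) (operation : String) : Prop :=
  ∀ d ∈ binary_data, PySem.Raise.InRange d.toList.length bit_position

instance (binary_data : List String) (bit_position : Int) (operation : String) : Decidable (Pre_get_filter_critera binary_data bit_position operation) := by unfold Pre_get_filter_critera; infer_instance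

def pvWitness_get_filter_critera : List String × Int × String := (["01", "10", "11"], 1, "oxygen")

def Spec_get_filter_critera (binary_data : List String) (bit_position : Int) (operation : String) (out : List Int) : Prop := out = get_filter_critera_alt binary_data bit_position operation
instance (binary_data : List String) (bit_position : Int) (operation : String) (out : List Int) : Decidable (Spec_get_filter_critera binary_data bit_position operation out) := by unfold Spec_get_filter_critera; infer_instance

-- ===== CLAIM (what is proved, stated in full; the proofs are below) =====
def Claim_equal_get_filter_critera : Prop := ∀ (binary_data : List String) (bit_position : Int) (operation : String), Dom_get_filter_critera binary_data bit_position operation → Pre_get_filter_critera binary_data bit_position operation → Spec_get_filter_critera binary_data bit_position operation (get_filter_critera binary_data bit_position operation)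

-- ===== LEMMAS AND PROOFS =====

-- A's loop, started at index s with accumulators whose elements are all < s,
-- appends fresh indices, so the sets are plain filtered index lists.
lemma pvLoopA (bp : Int) (xs : List String) (s c0 c1 : Int) (zs os : List Int)
    (hz : ∀ x ∈ zs, x < s) (ho : ∀ x ∈ os, x < s) :
    (PySem.List.enumerate xs s).foldl (pvStepA bp) (c0, c1, zs, os) =
      (c0 + (xs.countP (pvIsZero bp) : Int),
       c1 + ((xs.length : Int) - (xs.countP (pvIsZero bp) : Int)),
       zs ++ ((PySem.List.enumerate xs s).filter (fun q => pvIsZero bp q.2)).map (·.1),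
       os ++ ((PySem.List.enumerate xs s).filter (fun q => !pvIsZero bp q.2)).map (·.1)) := by
  induction xs generalizing s c0 c1 zs os with
  | nil => simp [PySem.List.enumerate_nil]
  | cons x xs ih =>
    rw [PySem.List.enumerate_cons]
    have hzelem : zs.contains s = false := by
      simp only [List.contains_eq_mem, decide_eq_false_iff_not]
      intro h; exact absurd (hz s h) (lt_irrefl s)
    have hoelem : os.contains s = false := by
      simp only [List.contains_eq_mem, decide_eq_false_iff_not]
      intro h; exact absurd (ho s h) (lt_irrefl s)
    by_cases hx : pvIsZero bp x
    · have := ih (s + 1) (c0 + 1) c1 (zs ++ [s]) os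
        (by intro y hy; rcases List.mem_append.1 hy with h | h
            · exact lt_trans (hz y h) (by omega)
            · simp at h; omega)
        (by intro y hy; exact lt_trans (ho y hy) (by omega))
      simp only [List.foldl_cons, pvStepA, hx, if_true, PySem.Set.add, PySem.Set.contains,
        hzelem, if_false, Bool.false_eq_true, List.length_cons, List.filter_cons, List.countP_cons, Bool.not_true]
      rw [this]
      simp only [Prod.mk.injEq, List.append_assoc, List.singleton_append]
      refine ⟨by push_cast; ring, by push_cast; ring, by simp, by simp⟩
    · have hx' : pvIsZero bp x = false := by simpa using hx
      have := ih (s + 1) c0 (c1 + 1) zs (os ++ [s])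
        (by intro y hy; exact lt_trans (hz y hy) (by omega))
        (by intro y hy; rcases List.mem_append.1 hy with h | h
            · exact lt_trans (ho y h) (by omega)
            · simp at h; omega)
      simp only [List.foldl_cons, pvStepA, hx', if_false, PySem.Set.add, PySem.Set.contains,
        hoelem, if_false, Bool.false_eq_true, List.length_cons, List.filter_cons, List.countP_cons, Bool.not_false]
      rw [this]
      simp only [Prod.mk.injEq, List.append_assoc, List.singleton_append]
      refine ⟨by push_cast; ring, by push_cast; ring, by simp, by simp⟩

-- the filtered index list is nodup (indices of enumerate are nodup)
lemma pvFilter_nodup (bp : Int) (xs : List String) (s : Int) (q : Int × String → Bool) :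
    (((PySem.List.enumerate xs s).filter q).map (·.1)).Nodup := by
  have hsub : List.Sublist (((PySem.List.enumerate xs s).filter q).map (·.1))
      ((PySem.List.enumerate xs s).map (·.1)) :=
    List.Sublist.map _ List.filter_sublist
  have hn : ((PySem.List.enumerate xs s).map (·.1)).Nodup := by
    rw [PySem.List.map_fst_enumerate]
    exact PySem.List.nodup_pyRange_one s (s + xs.length) 
  exact hn.sublist hsub

-- ===== VERDICT (by name: the statement is the Claim_ definition above) =====
theorem get_filter_critera_spec : Claim_equal_get_filter_critera := by
  intro binary_data bit_position operation _ _
  unfold Spec_get_filter_critera get_filter_critera get_filter_critera_alt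
  simp only [PySem.Set.empty]
  rw [pvLoopA bit_position binary_data 0 0 0 [] [] (by simp) (by simp)]
  simp only [List.nil_append]
  rw [PySem.Set.ofList_eq_self_of_nodup _ (pvFilter_nodup bit_position binary_data 0 _)]
  by_cases hop : (operation == "oxygen") = true <;>
    by_cases hcmp : (PySem.List.len binary_data - ((binary_data.countP (pvIsZero bit_position) : Nat) : Int)
      ≥ ((binary_data.countP (pvIsZero bit_position) : Nat) : Int))
  · have hkz : (decide (PySem.List.len binary_data - ((binary_data.countP (pvIsZero bit_position) : Nat) : Int)
        ≥ ((binary_data.countP (pvIsZero bit_position) : Nat) : Int)) != (operation == "oxygen")) = false := by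
      rw [hop, decide_eq_true hcmp]; rfl
    rw [hkz, if_pos hop,
      if_pos (show (0 : Int) + ((binary_data.length : Int) - _) ≥ 0 + _ by
        simp only [PySem.List.len_eq] at hcmp; omega),
      List.filter_congr (fun x _ => by cases pvIsZero bit_position x.2 <;> rfl :
        ∀ x ∈ PySem.List.enumerate binary_data, (!pvIsZero bit_position x.2)
          = (pvIsZero bit_position x.2 == false))]
  · have hkz : (decide (PySem.List.len binary_data - ((binary_data.countP (pvIsZero bit_position) : Nat) : Int)
        ≥ ((binary_data.countP (pvIsZero bit_position) : Nat) : Int)) != (operation == "oxygen")) = true := by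
      rw [hop, decide_eq_false hcmp]; rfl
    rw [hkz, if_pos hop,
      if_neg (show ¬ ((0 : Int) + ((binary_data.length : Int) - _) ≥ 0 + _) by
        simp only [PySem.List.len_eq] at hcmp; omega),
      List.filter_congr (fun x _ => by cases pvIsZero bit_position x.2 <;> rfl :
        ∀ x ∈ PySem.List.enumerate binary_data, (pvIsZero bit_position x.2)
          = (pvIsZero bit_position x.2 == true))]
  · have hop' : (operation == "oxygen") = false := by simpa using hop
    have hkz : (decide (PySem.List.len binary_data - ((binary_data.countP (pvIsZero bit_position) : Nat) : Int)
        ≥ ((binary_data.countP (pvIsZero bit_position) : Nat) : Int)) != (operation == "oxygen")) = true := by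
      rw [hop', decide_eq_true hcmp]; rfl
    rw [hkz, if_neg (by simp [hop']),
      if_pos (show (0 : Int) + _ ≤ 0 + ((binary_data.length : Int) - _) by
        simp only [PySem.List.len_eq] at hcmp; omega),
      List.filter_congr (fun x _ => by cases pvIsZero bit_position x.2 <;> rfl :
        ∀ x ∈ PySem.List.enumerate binary_data, (pvIsZero bit_position x.2)
          = (pvIsZero bit_position x.2 == true))]
  · have hop' : (operation == "oxygen") = false := by simpa using hop
    have hkz : (decide (PySem.List.len binary_data - ((binary_data.countP (pvIsZero bit_position) : Nat) : Int)
        ≥ ((binary_data.countP (pvIsZero bit_position) : Nat) : Int)) != (operation == "oxygen")) = false := by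
      rw [hop', decide_eq_false hcmp]; rfl
    rw [hkz, if_neg (by simp [hop']),
      if_neg (show ¬ ((0 : Int) + _ ≤ 0 + ((binary_data.length : Int) - _)) by
        simp only [PySem.List.len_eq] at hcmp; omega),
      List.filter_congr (fun x _ => by cases pvIsZero bit_position x.2 <;> rfl :
        ∀ x ∈ PySem.List.enumerate binary_data, (!pvIsZero bit_position x.2)
          = (pvIsZero bit_position x.2 == false))]
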